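-- pv_equiv track=rewrite | github.com/StojiljkovicVetAna/CAS_NLP_Module6 | src/compare.py | _build_overlap_status_maps
-- ===== SOURCE A (Python) =====
-- def _build_overlap_status_maps(
--     classical_keys: set[str],
--     llm_keys: set[str],
--     overlap_pairs: set[tuple[str, str]],
--     classical_label_map: dict[str, set[str]],
--     llm_label_map: dict[str, set[str]],
-- ) -> tuple[dict[str, str], dict[str, str], dict[str, set[str]], dict[str, set[str]], int, int]:
--     """Return mention status maps and label-match/mismatch counts."""
--     classical_to_llm: dict[str, set[str]] = {key: set() for key in classical_keys}
--     llm_to_classical: dict[str, set[str]] = {key: set() for key in llm_keys}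
--     for classical_key, llm_key in overlap_pairs:
--         classical_to_llm.setdefault(classical_key, set()).add(llm_key)
--         llm_to_classical.setdefault(llm_key, set()).add(classical_key)
--
--     classical_status: dict[str, str] = {}
--     llm_status: dict[str, str] = {}
--
--     overlap_label_match_count = 0
--     overlap_label_mismatch_count = 0
--     seen_overlap_pairs: set[tuple[str, str]] = set()
--
--     for classical_key, llm_key in overlap_pairs:
--         if (classical_key, llm_key) in seen_overlap_pairs:
--             continue
--         seen_overlap_pairs.add((classical_key, llm_key))
--         if classical_label_map.get(classical_key, set()) & llm_label_map.get(llm_key, set()):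
--             overlap_label_match_count += 1
--         else:
--             overlap_label_mismatch_count += 1
--
--     for classical_key in classical_keys:
--         linked = classical_to_llm.get(classical_key, set())
--         if not linked:
--             classical_status[classical_key] = "classical"
--             continue
--         has_match = any(
--             classical_label_map.get(classical_key, set()) & llm_label_map.get(llm_key, set())
--             for llm_key in linked
--         )
--         classical_status[classical_key] = "overlap_match" if has_match else "overlap_mismatch"
--
--     for llm_key in llm_keys:
--         linked = llm_to_classical.get(llm_key, set())
--         if not linked:
--             llm_status[llm_key] = "llm"
--             continue
--         has_match = any(
--             llm_label_map.get(llm_key, set()) & classical_label_map.get(classical_key, set())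
--             for classical_key in linked
--         )
--         llm_status[llm_key] = "overlap_match" if has_match else "overlap_mismatch"
--
--     return (
--         classical_status,
--         llm_status,
--         classical_to_llm,
--         llm_to_classical,
--         overlap_label_match_count,
--         overlap_label_mismatch_count,
--     )
-- ===== SOURCE B (Python) =====
-- def _build_overlap_status_maps(
--     classical_keys,
--     llm_keys,
--     overlap_pairs,
--     classical_label_map,
--     llm_label_map,
-- ):
--     """One pass over overlap_pairs builds both reverse maps, the match/mismatch
--     counts and per-key matched flags; the status loops then only test flags."""
--     classical_to_llm = {key: set() for key in classical_keys}
--     llm_to_classical = {key: set() for key in llm_keys}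
--     match_count = 0
--     mismatch_count = 0
--     matched_classical = set()
--     matched_llm = set()
--     seen = set()
--     for classical_key, llm_key in overlap_pairs:
--         classical_to_llm.setdefault(classical_key, set()).add(llm_key)
--         llm_to_classical.setdefault(llm_key, set()).add(classical_key)
--         labels_agree = bool(
--             classical_label_map.get(classical_key, set())
--             & llm_label_map.get(llm_key, set())
--         )
--         if (classical_key, llm_key) not in seen:
--             seen.add((classical_key, llm_key))
--             if labels_agree:
--                 match_count += 1
--             else:
--                 mismatch_count += 1
--         if labels_agree:
--             matched_classical.add(classical_key)
--             matched_llm.add(llm_key)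
--
--     classical_status = {}
--     for key in classical_keys:
--         if not classical_to_llm.get(key, set()):
--             classical_status[key] = "classical"
--         else:
--             classical_status[key] = (
--                 "overlap_match" if key in matched_classical else "overlap_mismatch"
--             )
--
--     llm_status = {}
--     for key in llm_keys:
--         if not llm_to_classical.get(key, set()):
--             llm_status[key] = "llm"
--         else:
--             llm_status[key] = (
--                 "overlap_match" if key in matched_llm else "overlap_mismatch"
--             )
--
--     return (
--         classical_status,
--         llm_status,
--         classical_to_llm,
--         llm_to_classical,
--         match_count,
--         mismatch_count,
--     )
-- ===== Notes on version B (the rewrite author's own statement) =====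
-- stated objective: alternative
-- what changed: B computes the reverse maps, the match/mismatch counts and per-key matched flags in ONE pass over overlap_pairs and the status loops just test the flags, instead of A's separate counting pass and the repeated set-intersection scan over each key's linked set inside the status loops.
import Mathlib
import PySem

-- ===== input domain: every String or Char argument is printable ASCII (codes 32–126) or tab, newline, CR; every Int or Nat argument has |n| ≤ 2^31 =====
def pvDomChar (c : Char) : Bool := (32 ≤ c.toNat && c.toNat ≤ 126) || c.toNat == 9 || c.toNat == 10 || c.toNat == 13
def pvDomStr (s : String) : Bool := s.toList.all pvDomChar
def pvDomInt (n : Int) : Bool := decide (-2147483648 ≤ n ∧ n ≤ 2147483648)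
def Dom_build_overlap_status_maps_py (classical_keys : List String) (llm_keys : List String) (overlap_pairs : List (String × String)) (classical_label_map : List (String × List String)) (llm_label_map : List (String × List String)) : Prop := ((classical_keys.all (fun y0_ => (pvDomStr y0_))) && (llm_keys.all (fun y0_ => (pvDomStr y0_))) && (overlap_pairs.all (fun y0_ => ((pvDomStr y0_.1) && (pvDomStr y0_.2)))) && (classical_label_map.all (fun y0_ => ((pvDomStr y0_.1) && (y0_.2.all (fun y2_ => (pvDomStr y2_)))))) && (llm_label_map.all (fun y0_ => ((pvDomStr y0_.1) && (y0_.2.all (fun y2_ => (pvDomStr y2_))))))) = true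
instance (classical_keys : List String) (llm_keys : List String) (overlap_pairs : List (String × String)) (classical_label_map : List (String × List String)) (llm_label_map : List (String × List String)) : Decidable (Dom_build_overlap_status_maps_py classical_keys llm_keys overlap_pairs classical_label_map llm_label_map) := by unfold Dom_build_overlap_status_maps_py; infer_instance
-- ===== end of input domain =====

-- B folds reverse maps, counts and matched flags in one pass over overlap_pairs; the status
-- loops test the flags instead of rescanning label intersections (objective: alternative).

-- ===== PORT A =====
-- shared primitive: Python's `label_map.get(key, set())` (dict lookup with set default)
def pvLabels (m : List (String × List String)) (k : String) : List String :=
  (PySem.Dict.mk m).getD k []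

-- shared primitive: truthiness of `m1.get(a, set()) & m2.get(b, set())`
def pvAgree (m1 m2 : List (String × List String)) (a b : String) : Bool :=
  !(PySem.Set.inter (pvLabels m1 a) (pvLabels m2 b)).isEmpty

def build_overlap_status_maps_py (classical_keys : List String) (llm_keys : List String) (overlap_pairs : List (String × String)) (classical_label_map : List (String × List String)) (llm_label_map : List (String × List String)) : (List (String × String)) × (List (String × String)) × (List (String × List String)) × (List (String × List String)) × Int × Int :=
  -- {key: set() for key in classical_keys} / llm_keys
  let c2l0 : PySem.Dict String (PySem.Set String) :=
    classical_keys.foldl (fun d k => d.insert k PySem.Set.empty) PySem.Dict.empty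
  let l2c0 : PySem.Dict String (PySem.Set String) :=
    llm_keys.foldl (fun d k => d.insert k PySem.Set.empty) PySem.Dict.empty
  -- first loop: setdefault(k, set()).add(v) on both dicts (= Dict.modify)
  let maps :=
    overlap_pairs.foldl
      (fun (st : PySem.Dict String (PySem.Set String) × PySem.Dict String (PySem.Set String)) p =>
        (st.1.modify p.1 PySem.Set.empty (fun s => PySem.Set.add s p.2),
         st.2.modify p.2 PySem.Set.empty (fun s => PySem.Set.add s p.1)))
      (c2l0, l2c0)
  -- second loop: dedup by seen_overlap_pairs, count label match/mismatch
  let counts :=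
    overlap_pairs.foldl
      (fun (st : PySem.Set (String × String) × Int × Int) p =>
        if PySem.Set.contains st.1 p then st
        else (PySem.Set.add st.1 p,
              if pvAgree classical_label_map llm_label_map p.1 p.2
              then (st.2.1 + 1, st.2.2) else (st.2.1, st.2.2 + 1)))
      (PySem.Set.empty, 0, 0)
  -- third loop: classical_status
  let classical_status :=
    classical_keys.foldl
      (fun (d : PySem.Dict String String) k =>
        let linked := maps.1.getD k PySem.Set.empty
        if linked.isEmpty then d.insert k "classical"
        else if linked.any (fun l => pvAgree classical_label_map llm_label_map k l)
        then d.insert k "overlap_match" else d.insert k "overlap_mismatch")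
      PySem.Dict.empty
  -- fourth loop: llm_status
  let llm_status :=
    llm_keys.foldl
      (fun (d : PySem.Dict String String) k =>
        let linked := maps.2.getD k PySem.Set.empty
        if linked.isEmpty then d.insert k "llm"
        else if linked.any (fun c => pvAgree llm_label_map classical_label_map k c)
        then d.insert k "overlap_match" else d.insert k "overlap_mismatch")
      PySem.Dict.empty
  (classical_status.items, llm_status.items, maps.1.items, maps.2.items, counts.2.1, counts.2.2)

-- ===== PORT B =====
structure PvPass where
  c2l : PySem.Dict String (PySem.Set String)
  l2c : PySem.Dict String (PySem.Set String)
  matchedC : PySem.Set String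
  matchedL : PySem.Set String
  seen : PySem.Set (String × String)
  matchCnt : Int
  mismatchCnt : Int

-- one loop body of Source B's single pass over overlap_pairs
def pvStep (clm llm : List (String × List String)) (st : PvPass) (p : String × String) : PvPass :=
  let ag := pvAgree clm llm p.1 p.2
  { c2l := st.c2l.modify p.1 PySem.Set.empty (fun s => PySem.Set.add s p.2)
    l2c := st.l2c.modify p.2 PySem.Set.empty (fun s => PySem.Set.add s p.1)
    matchedC := if ag then PySem.Set.add st.matchedC p.1 else st.matchedC
    matchedL := if ag then PySem.Set.add st.matchedL p.2 else st.matchedL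
    seen := if PySem.Set.contains st.seen p then st.seen else PySem.Set.add st.seen p
    matchCnt := if PySem.Set.contains st.seen p then st.matchCnt
                else if ag then st.matchCnt + 1 else st.matchCnt
    mismatchCnt := if PySem.Set.contains st.seen p then st.mismatchCnt
                   else if ag then st.mismatchCnt else st.mismatchCnt + 1 }

def build_overlap_status_maps_py_alt (classical_keys : List String) (llm_keys : List String) (overlap_pairs : List (String × String)) (classical_label_map : List (String × List String)) (llm_label_map : List (String × List String)) : (List (String × String)) × (List (String × String)) × (List (String × List String)) × (List (String × List String)) × Int × Int :=
  let st :=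
    overlap_pairs.foldl (pvStep classical_label_map llm_label_map)
      { c2l := classical_keys.foldl (fun d k => d.insert k PySem.Set.empty) PySem.Dict.empty
        l2c := llm_keys.foldl (fun d k => d.insert k PySem.Set.empty) PySem.Dict.empty
        matchedC := PySem.Set.empty, matchedL := PySem.Set.empty, seen := PySem.Set.empty
        matchCnt := 0, mismatchCnt := 0 }
  let classical_status :=
    classical_keys.foldl
      (fun (d : PySem.Dict String String) k =>
        if (st.c2l.getD k PySem.Set.empty).isEmpty then d.insert k "classical"
        else if PySem.Set.contains st.matchedC k then d.insert k "overlap_match"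
        else d.insert k "overlap_mismatch")
      PySem.Dict.empty
  let llm_status :=
    llm_keys.foldl
      (fun (d : PySem.Dict String String) k =>
        if (st.l2c.getD k PySem.Set.empty).isEmpty then d.insert k "llm"
        else if PySem.Set.contains st.matchedL k then d.insert k "overlap_match"
        else d.insert k "overlap_mismatch")
      PySem.Dict.empty
  (classical_status.items, llm_status.items, st.c2l.items, st.l2c.items, st.matchCnt, st.mismatchCnt)

-- ===== PRECONDITION & SPEC =====
def Spec_build_overlap_status_maps_py (classical_keys : List String) (llm_keys : List String) (overlap_pairs : List (String × String)) (classical_label_map : List (String × List String)) (llm_label_map : List (String × List String)) (out : (List (String × String)) × (List (String × String)) × (List (String × List String)) × (List (String × List String)) × Int × Int) : Prop := out = build_overlap_status_maps_py_alt classical_keys llm_keys overlap_pairs classical_label_map llm_label_map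
instance (classical_keys : List String) (llm_keys : List String) (overlap_pairs : List (String × String)) (classical_label_map : List (String × List String)) (llm_label_map : List (String × List String)) (out : (List (String × String)) × (List (String × String)) × (List (String × List String)) × (List (String × List String)) × Int × Int) : Decidable (Spec_build_overlap_status_maps_py classical_keys llm_keys overlap_pairs classical_label_map llm_label_map out) := by
  unfold Spec_build_overlap_status_maps_py
  -- the 6-component product exceeds the default instance-search size; assemble it explicitly
  have h4 : DecidableEq ((List (String × List String)) × (List (String × List String)) × Int × Int) := inferInstance
  have h5 : DecidableEq ((List (String × String)) × (List (String × List String)) × (List (String × List String)) × Int × Int) := @instDecidableEqProd _ _ inferInstance h4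
  exact @instDecidableEqProd _ _ inferInstance h5 out _

-- ===== CLAIM (what is proved, stated in full; the proofs are below) =====
def Claim_equal_build_overlap_status_maps_py : Prop := ∀ (classical_keys : List String) (llm_keys : List String) (overlap_pairs : List (String × String)) (classical_label_map : List (String × List String)) (llm_label_map : List (String × List String)), Dom_build_overlap_status_maps_py classical_keys llm_keys overlap_pairs classical_label_map llm_label_map → Spec_build_overlap_status_maps_py classical_keys llm_keys overlap_pairs classical_label_map llm_label_map (build_overlap_status_maps_py classical_keys llm_keys overlap_pairs classical_label_map llm_label_map)

-- ===== LEMMAS AND PROOFS =====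

-- symmetry of the truthiness of the label intersection
lemma pvInterEmpty_symm (s t : List String) :
    (PySem.Set.inter s t).isEmpty = (PySem.Set.inter t s).isEmpty := by
  rw [Bool.eq_iff_iff]
  simp only [List.isEmpty_iff, List.eq_nil_iff_forall_not_mem]
  constructor <;> intro h x hx <;> rw [PySem.Set.mem_inter] at hx <;>
    exact h x (by rw [PySem.Set.mem_inter]; exact ⟨hx.2, hx.1⟩)

lemma pvAgree_symm (m1 m2 : List (String × List String)) (a b : String) :
    pvAgree m2 m1 b a = pvAgree m1 m2 a b := by
  simp only [pvAgree, pvInterEmpty_symm]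

-- Bool facts about Set.add used by the invariant
lemma pvContains_add {α : Type} [DecidableEq α] (s : PySem.Set α) (x k : α) :
    PySem.Set.contains (PySem.Set.add s x) k = (PySem.Set.contains s k || k == x) := by
  simp only [PySem.Set.contains, PySem.Set.add_eq_ite, List.contains_eq_mem]
  split_ifs with h
  · rcases eq_or_ne k x with rfl | hne
    · simp [h]
    · simp [hne]
  · rw [Bool.eq_iff_iff]
    simp [List.mem_append, beq_iff_eq]

lemma pvAny_add {α : Type} [DecidableEq α] (s : PySem.Set α) (x : α) (f : α → Bool) :
    (PySem.Set.add s x).any f = (s.any f || f x) := by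
  simp only [PySem.Set.add_eq_ite]
  split_ifs with h
  · rcases hf : f x with _ | _
    · simp
    · simp only [Bool.or_true]
      exact List.any_eq_true.mpr ⟨x, h, hf⟩
  · simp [List.any_append]

-- B's single pass projects onto A's independent folds
lemma pvPass_proj (clm llm : List (String × List String)) (op : List (String × String)) (st : PvPass) :
    op.foldl (pvStep clm llm) st =
      { c2l := op.foldl (fun d p => d.modify p.1 PySem.Set.empty (fun s => PySem.Set.add s p.2)) st.c2l
        l2c := op.foldl (fun d p => d.modify p.2 PySem.Set.empty (fun s => PySem.Set.add s p.1)) st.l2c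
        matchedC := op.foldl (fun s p => if pvAgree clm llm p.1 p.2 then PySem.Set.add s p.1 else s) st.matchedC
        matchedL := op.foldl (fun s p => if pvAgree clm llm p.1 p.2 then PySem.Set.add s p.2 else s) st.matchedL
        seen := (op.foldl (fun (c : PySem.Set (String × String) × Int × Int) p =>
                   if PySem.Set.contains c.1 p then c
                   else (PySem.Set.add c.1 p,
                         if pvAgree clm llm p.1 p.2 then (c.2.1 + 1, c.2.2) else (c.2.1, c.2.2 + 1)))
                 (st.seen, st.matchCnt, st.mismatchCnt)).1
        matchCnt := (op.foldl (fun (c : PySem.Set (String × String) × Int × Int) p =>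
                   if PySem.Set.contains c.1 p then c
                   else (PySem.Set.add c.1 p,
                         if pvAgree clm llm p.1 p.2 then (c.2.1 + 1, c.2.2) else (c.2.1, c.2.2 + 1)))
                 (st.seen, st.matchCnt, st.mismatchCnt)).2.1
        mismatchCnt := (op.foldl (fun (c : PySem.Set (String × String) × Int × Int) p =>
                   if PySem.Set.contains c.1 p then c
                   else (PySem.Set.add c.1 p,
                         if pvAgree clm llm p.1 p.2 then (c.2.1 + 1, c.2.2) else (c.2.1, c.2.2 + 1)))
                 (st.seen, st.matchCnt, st.mismatchCnt)).2.2 } := by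
  induction op generalizing st with
  | nil => rfl
  | cons p op ih =>
    simp only [List.foldl_cons, ih]
    congr 1 <;> simp only [pvStep] <;>
      · congr 1
        split_ifs <;> rfl

-- A's pair-state first loop projects onto the same two independent folds
lemma pvPairFold_proj (op : List (String × String))
    (d1 d2 : PySem.Dict String (PySem.Set String)) :
    op.foldl
      (fun (st : PySem.Dict String (PySem.Set String) × PySem.Dict String (PySem.Set String)) p =>
        (st.1.modify p.1 PySem.Set.empty (fun s => PySem.Set.add s p.2),
         st.2.modify p.2 PySem.Set.empty (fun s => PySem.Set.add s p.1)))
      (d1, d2) =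
    (op.foldl (fun d p => d.modify p.1 PySem.Set.empty (fun s => PySem.Set.add s p.2)) d1,
     op.foldl (fun d p => d.modify p.2 PySem.Set.empty (fun s => PySem.Set.add s p.1)) d2) := by
  induction op generalizing d1 d2 with
  | nil => rfl
  | cons p op ih => simp only [List.foldl_cons, ih]

-- the matched-classical invariant: a key is flagged iff some linked llm key agrees
lemma pvMatchedC_inv (clm llm : List (String × List String)) (op : List (String × String))
    (d : PySem.Dict String (PySem.Set String)) (mc : PySem.Set String)
    (h : ∀ k, PySem.Set.contains mc k =
          (d.getD k PySem.Set.empty).any (fun l => pvAgree clm llm k l)) :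
    ∀ k, PySem.Set.contains
        (op.foldl (fun s p => if pvAgree clm llm p.1 p.2 then PySem.Set.add s p.1 else s) mc) k =
      ((op.foldl (fun d' p => d'.modify p.1 PySem.Set.empty (fun s => PySem.Set.add s p.2)) d).getD
          k PySem.Set.empty).any (fun l => pvAgree clm llm k l) := by
  induction op generalizing d mc with
  | nil => exact h
  | cons p op ih =>
    simp only [List.foldl_cons]
    apply ih
    intro k
    rw [PySem.Dict.getD_modify]
    by_cases hk : k = p.1
    · subst hk
      rw [if_pos rfl, pvAny_add]
      rcases hag : pvAgree clm llm p.1 p.2 with _ | _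
      · rw [if_neg (by simp), Bool.or_false]
        exact h p.1
      · rw [if_pos rfl, pvContains_add]
        simp
    · rw [if_neg hk, ← h k]
      rcases hag : pvAgree clm llm p.1 p.2 with _ | _
      · rw [if_neg (by simp)]
      · rw [if_pos rfl, pvContains_add]
        simp [beq_iff_eq, hk]

-- the matched-llm invariant (mirror image, with the intersection taken the other way round)
lemma pvMatchedL_inv (clm llm : List (String × List String)) (op : List (String × String))
    (d : PySem.Dict String (PySem.Set String)) (ml : PySem.Set String)
    (h : ∀ k, PySem.Set.contains ml k =
          (d.getD k PySem.Set.empty).any (fun c => pvAgree llm clm k c)) :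
    ∀ k, PySem.Set.contains
        (op.foldl (fun s p => if pvAgree clm llm p.1 p.2 then PySem.Set.add s p.2 else s) ml) k =
      ((op.foldl (fun d' p => d'.modify p.2 PySem.Set.empty (fun s => PySem.Set.add s p.1)) d).getD
          k PySem.Set.empty).any (fun c => pvAgree llm clm k c) := by
  induction op generalizing d ml with
  | nil => exact h
  | cons p op ih =>
    simp only [List.foldl_cons]
    apply ih
    intro k
    rw [PySem.Dict.getD_modify]
    by_cases hk : k = p.2
    · subst hk
      rw [if_pos rfl, pvAny_add, pvAgree_symm llm clm]
      rcases hag : pvAgree llm clm p.2 p.1 with _ | _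
      · rw [if_neg (by simp), Bool.or_false]
        exact h p.2
      · rw [if_pos rfl, pvContains_add]
        simp
    · rw [if_neg hk, ← h k]
      rcases hag : pvAgree clm llm p.1 p.2 with _ | _
      · rw [if_neg (by simp)]
      · rw [if_pos rfl, pvContains_add]
        simp [beq_iff_eq, hk]

-- initial comprehension: every stored value is the empty set
lemma pvInit_getD (keys : List String) :
    ∀ k, ((keys.foldl (fun d k' => d.insert k' PySem.Set.empty)
          (PySem.Dict.empty : PySem.Dict String (PySem.Set String))).getD k PySem.Set.empty)
      = (PySem.Set.empty : PySem.Set String) := by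
  have aux : ∀ (ks : List String) (d : PySem.Dict String (PySem.Set String)),
      (∀ k, d.getD k PySem.Set.empty = PySem.Set.empty) →
      ∀ k, (ks.foldl (fun d k' => d.insert k' PySem.Set.empty) d).getD k PySem.Set.empty
        = PySem.Set.empty := by
    intro ks
    induction ks with
    | nil => intro d h k; exact h k
    | cons a ks ih =>
      intro d h k
      simp only [List.foldl_cons]
      apply ih
      intro j
      rw [PySem.Dict.getD_insert]
      split_ifs <;> [rfl; exact h j]
  exact aux keys PySem.Dict.empty (fun k => PySem.Dict.getD_empty _ _)

-- ===== VERDICT (by name: the statement is the Claim_ definition above) =====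
theorem build_overlap_status_maps_py_spec : Claim_equal_build_overlap_status_maps_py := by
  intro ck lk op clm llm _
  unfold Spec_build_overlap_status_maps_py
  simp only [build_overlap_status_maps_py, build_overlap_status_maps_py_alt]
  rw [pvPairFold_proj, pvPass_proj]
  have hC := pvMatchedC_inv clm llm op
      (ck.foldl (fun d k => d.insert k PySem.Set.empty) PySem.Dict.empty) PySem.Set.empty
      (fun k => by rw [pvInit_getD]; rfl)
  have hL := pvMatchedL_inv clm llm op
      (lk.foldl (fun d k => d.insert k PySem.Set.empty) PySem.Dict.empty) PySem.Set.empty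
      (fun k => by rw [pvInit_getD]; rfl)
  refine congrArg₂ _ ?_ (congrArg₂ _ ?_ rfl)
  · refine congrArg _ (congrArg₂ (List.foldl · · ck) ?_ rfl)
    funext d k
    simp only [hC k]
  · refine congrArg _ (congrArg₂ (List.foldl · · lk) ?_ rfl)
    funext d k
    simp only [hL k]
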